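-- pv_equiv track=rewrite | github.com/mcsc-impact-climate/MIT_NavigaTE_inputs | source/plot_multifuel_results.py | sort_color_label_columns
-- ===== SOURCE A (Python) =====
-- fuel_colors = {
--     "ammonia": "tab:blue",
--     "hydrogen": "tab:orange",
--     "liquid_hydrogen": "tab:orange",
--     "methanol": "tab:green",
--     "diesel": "tab:red",
--     "FTdiesel": "tab:red",
--     "oil": "black",
--     "lsfo": "black",
--     "lng": "tab:grey",
--     "methane": "tab:grey"
-- }
--
-- fuel_names = {
--     "ammonia": "Ammonia",
--     "hydrogen": "Liquid Hydrogen",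
--     "liquid_hydrogen": "Liquid Hydrogen",
--     "methanol": "Methanol",
--     "diesel": "FT Diesel",
--     "FTdiesel": "FT Diesel",
--     "oil": "LSFO",
--     "lsfo": "LSFO",
--     "lng": "LNG",
--     "methane": "LNG"
-- }
--
-- def sort_color_label_columns(columns):
--     """
--     Returns:
--         sorted_cols: list of original column names sorted according to fuel_colors
--         color_list: list of colors matching sorted_cols
--         label_list: list of display names (from fuel_names) matching sorted_cols
--     """
--     sorted_cols = []
--     colors = []
--     labels = []
--     remaining_cols = list(columns)
--
--     for fuel_key in fuel_colors.keys():
--         matching_cols = [col for col in remaining_cols if fuel_key in col.lower()]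
--         for col in matching_cols:
--             sorted_cols.append(col)
--             colors.append(fuel_colors[fuel_key])
--             labels.append(fuel_names[fuel_key])
--             remaining_cols.remove(col)
--
--     for col in remaining_cols:
--         sorted_cols.append(col)
--         colors.append("grey")
--         labels.append(col)
--
--     return sorted_cols, colors, labels
-- ===== SOURCE B (Python) =====
-- fuel_colors = {
--     "ammonia": "tab:blue",
--     "hydrogen": "tab:orange",
--     "liquid_hydrogen": "tab:orange",
--     "methanol": "tab:green",
--     "diesel": "tab:red",
--     "FTdiesel": "tab:red",
--     "oil": "black",
--     "lsfo": "black",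
--     "lng": "tab:grey",
--     "methane": "tab:grey"
-- }
--
-- fuel_names = {
--     "ammonia": "Ammonia",
--     "hydrogen": "Liquid Hydrogen",
--     "liquid_hydrogen": "Liquid Hydrogen",
--     "methanol": "Methanol",
--     "diesel": "FT Diesel",
--     "FTdiesel": "FT Diesel",
--     "oil": "LSFO",
--     "lsfo": "LSFO",
--     "lng": "LNG",
--     "methane": "LNG"
-- }
--
-- def sort_color_label_columns(columns):
--     keys = list(fuel_colors)
--     n = len(keys)
--     buckets = [[] for _ in range(n + 1)]
--     for col in columns:
--         low = col.lower()
--         r = next((i for i, k in enumerate(keys) if k in low), n)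
--         buckets[r].append(col)
--     sorted_cols, colors, labels = [], [], []
--     for r, bucket in enumerate(buckets):
--         for col in bucket:
--             sorted_cols.append(col)
--             if r < n:
--                 colors.append(fuel_colors[keys[r]])
--                 labels.append(fuel_names[keys[r]])
--             else:
--                 colors.append("grey")
--                 labels.append(col)
--     return sorted_cols, colors, labels
-- ===== Notes on version B (the rewrite author's own statement) =====
-- stated objective: alternative
-- what changed: Instead of A's key-major loop that repeatedly filters the shrinking remaining list and mutates it with list.remove, B makes a single column-major pass computing each column's first-matching-key rank and drops it into one of 11 buckets (counting sort), then concatenates the buckets.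
import Mathlib
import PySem

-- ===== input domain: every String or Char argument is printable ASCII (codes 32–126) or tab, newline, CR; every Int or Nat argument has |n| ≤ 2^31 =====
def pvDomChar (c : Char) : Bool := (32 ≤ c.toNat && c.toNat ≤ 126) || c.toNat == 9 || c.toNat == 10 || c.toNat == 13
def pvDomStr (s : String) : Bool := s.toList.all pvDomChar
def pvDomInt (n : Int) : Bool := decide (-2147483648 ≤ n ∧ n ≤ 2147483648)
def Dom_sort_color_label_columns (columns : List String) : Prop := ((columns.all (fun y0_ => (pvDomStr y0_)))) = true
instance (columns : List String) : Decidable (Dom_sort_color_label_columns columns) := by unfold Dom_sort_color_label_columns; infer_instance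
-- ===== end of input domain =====

-- B replaces A's key-major repeated filter/remove over the remaining list by one
-- column-major pass that buckets each column under its first-matching fuel key
-- (counting sort) and then concatenates the buckets (objective: alternative).

-- ===== PORT A =====
def fuelColors : PySem.Dict String String := PySem.Dict.ofList
  [("ammonia","tab:blue"),("hydrogen","tab:orange"),("liquid_hydrogen","tab:orange"),
   ("methanol","tab:green"),("diesel","tab:red"),("FTdiesel","tab:red"),
   ("oil","black"),("lsfo","black"),("lng","tab:grey"),("methane","tab:grey")]

def fuelNames : PySem.Dict String String := PySem.Dict.ofList
  [("ammonia","Ammonia"),("hydrogen","Liquid Hydrogen"),("liquid_hydrogen","Liquid Hydrogen"),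
   ("methanol","Methanol"),("diesel","FT Diesel"),("FTdiesel","FT Diesel"),
   ("oil","LSFO"),("lsfo","LSFO"),("lng","LNG"),("methane","LNG")]

-- fuel_colors[fuel_key] / fuel_names[fuel_key]: fuel_key comes from fuel_colors.keys(),
-- so the KeyError branch is unreachable; `.getD ""` only totalises the lookup.
-- remaining_cols.remove(col): col ∈ remaining_cols always, so `.getD` is unreachable too.
def sort_color_label_columns (columns : List String) : List String × List String × List String :=
  let st := fuelColors.keys.foldl
    (fun (st : List String × List String × List String × List String) fuel_key =>
      let matching := st.2.2.2.filter (fun col => PySem.Str.isIn fuel_key (PySem.Str.lower col))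
      matching.foldl
        (fun (st2 : List String × List String × List String × List String) col =>
          (st2.1 ++ [col],
           st2.2.1 ++ [(PySem.Dict.get? fuelColors fuel_key).getD ""],
           st2.2.2.1 ++ [(PySem.Dict.get? fuelNames fuel_key).getD ""],
           (PySem.List.remove? st2.2.2.2 col).getD st2.2.2.2))
        st)
    ([], [], [], columns)
  st.2.2.2.foldl
    (fun (st3 : List String × List String × List String) col =>
      (st3.1 ++ [col], st3.2.1 ++ ["grey"], st3.2.2 ++ [col]))
    (st.1, st.2.1, st.2.2.1)

-- ===== PORT B =====
def sort_color_label_columns_alt (columns : List String) : List String × List String × List String :=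
  let keys := fuelColors.keys
  let n := keys.length
  let buckets := columns.foldl
    (fun (bs : List (List String)) col =>
      let low := PySem.Str.lower col
      let r := (keys.findIdx? (fun k => PySem.Str.isIn k low)).getD n
      bs.set r (bs.getD r [] ++ [col]))
    (List.replicate (n + 1) [])
  (PySem.List.enumerate buckets).foldl
    (fun (st : List String × List String × List String) rb =>
      rb.2.foldl
        (fun (st2 : List String × List String × List String) col =>
          (st2.1 ++ [col],
           st2.2.1 ++ [if rb.1 < (n : Int) then (PySem.Dict.get? fuelColors (PySem.List.pyGetD keys rb.1 "")).getD "" else "grey"],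
           st2.2.2 ++ [if rb.1 < (n : Int) then (PySem.Dict.get? fuelNames (PySem.List.pyGetD keys rb.1 "")).getD "" else col]))
        st)
    ([], [], [])

-- ===== PRECONDITION & SPEC =====
def Spec_sort_color_label_columns (columns : List String) (out : List String × List String × List String) : Prop := out = sort_color_label_columns_alt columns
instance (columns : List String) (out : List String × List String × List String) : Decidable (Spec_sort_color_label_columns columns out) := by unfold Spec_sort_color_label_columns; infer_instance

-- ===== CLAIM (what is proved, stated in full; the proofs are below) =====
def Claim_equal_sort_color_label_columns : Prop := ∀ (columns : List String), Dom_sort_color_label_columns columns → Spec_sort_color_label_columns columns (sort_color_label_columns columns)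

-- ===== LEMMAS AND PROOFS =====

-- the match test, color and label assignment A uses, named for the proofs
def qA (k col : String) : Bool := PySem.Str.isIn k (PySem.Str.lower col)
def cA (k : String) : String := (PySem.Dict.get? fuelColors k).getD ""
def lA (k : String) : String := (PySem.Dict.get? fuelNames k).getD ""

-- rank of a column: index of the first matching key (length if none)
def rnk (ks : List String) (c : String) : Nat := ks.findIdx (fun k => qA k c)

-- what A's key-major loop accumulates (sorted cols, colors, labels)
def gT (ks cols : List String) : List String × List String × List String :=
  match ks with
  | [] => ([], [], [])
  | k :: ks =>
      let m := cols.filter (fun x => qA k x)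
      let rest := gT ks (cols.filter (fun x => !qA k x))
      (m ++ rest.1, m.map (fun _ => cA k) ++ rest.2.1, m.map (fun _ => lA k) ++ rest.2.2)

-- what is left in remaining_cols after A's key-major loop
def hR (ks cols : List String) : List String :=
  match ks with
  | [] => cols
  | k :: ks => hR ks (cols.filter (fun x => !qA k x))

-- repeated list.remove, as performed by A's inner loop
def removeAll (xs r : List String) : List String :=
  xs.foldl (fun r x => (PySem.List.remove? r x).getD r) r

theorem removeAll_cons_of_ne (xs : List String) (a : String) (h : ∀ x ∈ xs, x ≠ a)
    (r : List String) : removeAll xs (a :: r) = a :: removeAll xs r := by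
  induction xs generalizing r with
  | nil => rfl
  | cons x xs ih =>
      have hxa : a ≠ x := fun hh => (h x (by simp)) hh.symm
      have hstep : (PySem.List.remove? (a :: r) x).getD (a :: r)
          = a :: (PySem.List.remove? r x).getD r := by
        rw [PySem.List.remove?_cons_of_ne r hxa]
        cases PySem.List.remove? r x <;> simp
      simp only [removeAll, List.foldl_cons] at *
      rw [hstep, ih (fun y hy => h y (by simp [hy]))]

theorem removeAll_filter (q : String → Bool) (r : List String) :
    removeAll (r.filter q) r = r.filter (fun x => !q x) := by
  induction r with
  | nil => rfl
  | cons a r ih =>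
      by_cases hq : q a
      · simp only [List.filter_cons, hq, if_pos, removeAll, List.foldl_cons,
          PySem.List.remove?_cons_self, Option.getD_some]
        simpa [removeAll, hq] using ih
      · have hq' : q a = false := by simpa using hq
        simp only [List.filter_cons, hq', Bool.false_eq_true, if_false]
        rw [removeAll_cons_of_ne _ _ (fun x hx => ?_) r, ih]
        · simp [List.filter_cons, hq']
        · intro hxa; subst hxa
          exact hq (by simpa using (List.of_mem_filter hx))

theorem foldl_app3 (xs : List String) (f2 f3 : String → String) (s c l : List String) :
    xs.foldl (fun st col => (st.1 ++ [col], st.2.1 ++ [f2 col], st.2.2 ++ [f3 col])) (s, c, l)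
      = (s ++ xs, c ++ xs.map f2, l ++ xs.map f3) := by
  induction xs generalizing s c l with
  | nil => simp
  | cons x xs ih => simp [ih]

theorem foldl_app3_remove (xs : List String) (a b : String) (s c l r : List String) :
    xs.foldl (fun st2 col =>
        (st2.1 ++ [col], st2.2.1 ++ [a], st2.2.2.1 ++ [b],
          (PySem.List.remove? st2.2.2.2 col).getD st2.2.2.2)) (s, c, l, r)
      = (s ++ xs, c ++ xs.map (fun _ => a), l ++ xs.map (fun _ => b), removeAll xs r) := by
  induction xs generalizing s c l r with
  | nil => simp [removeAll]
  | cons x xs ih => simp [removeAll, ih]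

theorem A_outer (ks : List String) (s c l cols : List String) :
    ks.foldl
      (fun (st : List String × List String × List String × List String) fuel_key =>
        (st.2.2.2.filter (fun col => PySem.Str.isIn fuel_key (PySem.Str.lower col))).foldl
          (fun (st2 : List String × List String × List String × List String) col =>
            (st2.1 ++ [col],
             st2.2.1 ++ [(PySem.Dict.get? fuelColors fuel_key).getD ""],
             st2.2.2.1 ++ [(PySem.Dict.get? fuelNames fuel_key).getD ""],
             (PySem.List.remove? st2.2.2.2 col).getD st2.2.2.2))
          st)
      (s, c, l, cols)
      = (s ++ (gT ks cols).1, c ++ (gT ks cols).2.1, l ++ (gT ks cols).2.2, hR ks cols) := by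
  induction ks generalizing s c l cols with
  | nil => simp [gT, hR]
  | cons k ks ih =>
      simp only [List.foldl_cons]
      rw [show (cols.filter (fun col => PySem.Str.isIn k (PySem.Str.lower col)))
            = cols.filter (fun x => qA k x) from rfl]
      rw [foldl_app3_remove, removeAll_filter, ih]
      simp [gT, hR, cA, lA]

-- characterisation of A's accumulators as rank buckets
theorem rnk_cons_eq_zero (k : String) (ks : List String) (x : String) :
    (rnk (k :: ks) x == 0) = qA k x := by
  simp only [rnk, List.findIdx_cons]
  cases h : qA k x <;> simp [h]

theorem hR_eq (ks cols : List String) :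
    hR ks cols = cols.filter (fun x => rnk ks x == ks.length) := by
  induction ks generalizing cols with
  | nil => simp [hR, rnk]
  | cons k ks ih =>
      simp only [hR, ih, List.filter_filter, List.length_cons]
      exact List.filter_congr (fun x _ => by
        cases hq : qA k x <;> simp [rnk, List.findIdx_cons, hq])

theorem gT_eq (ks cols : List String) :
    gT ks cols =
      ((List.range ks.length).flatMap (fun i => cols.filter (fun x => rnk ks x == i)),
       (List.range ks.length).flatMap
         (fun i => (cols.filter (fun x => rnk ks x == i)).map (fun _ => cA (ks.getD i ""))),
       (List.range ks.length).flatMap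
         (fun i => (cols.filter (fun x => rnk ks x == i)).map (fun _ => lA (ks.getD i "")))) := by
  induction ks generalizing cols with
  | nil => simp [gT]
  | cons k ks ih =>
      have h0 : cols.filter (fun x => qA k x) = cols.filter (fun x => rnk (k :: ks) x == 0) :=
        List.filter_congr (fun x _ => (rnk_cons_eq_zero k ks x).symm)
      have hb : ∀ i : Nat,
          (cols.filter (fun x => !qA k x)).filter (fun x => rnk ks x == i)
            = cols.filter (fun x => rnk (k :: ks) x == i + 1) := by
        intro i
        rw [List.filter_filter]
        exact List.filter_congr (fun x _ => by
          cases hq : qA k x <;> simp [rnk, List.findIdx_cons, hq])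
      simp only [gT, ih, List.length_cons, List.range_succ_eq_map, List.flatMap_cons,
        List.flatMap_map, hb, h0, List.getD_cons_zero, List.getD_cons_succ, Nat.succ_eq_add_one]

-- B-side: rank via findIdx? + getD
theorem findIdx?_getD (ks : List String) (p : String → Bool) :
    (ks.findIdx? p).getD ks.length = ks.findIdx p := by
  induction ks with
  | nil => rfl
  | cons k ks ih =>
      rw [List.findIdx?_cons, List.findIdx_cons]
      cases h : p k
      · simp only [Bool.false_eq_true, if_false, cond_false]
        cases hh : ks.findIdx? p <;> simp [hh, ← ih]
      · simp [h]

theorem set_map_range (m : Nat) (f : Nat → List String) (r : Nat) (v : List String) :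
    ((List.range m).map f).set r v
      = (List.range m).map (fun i => if i = r then v else f i) := by
  apply List.ext_getElem
  · simp
  · intro i h1 h2
    simp only [List.length_set, List.length_map, List.length_range] at h1
    simp only [List.getElem_set, List.getElem_map, List.getElem_range]
    by_cases h : r = i
    · subst h; simp
    · simp [h, show i ≠ r from fun hh => h hh.symm]

theorem B_fold1 (cols : List String) (m : Nat) (f : Nat → List String)
    (hm : ∀ col ∈ cols, rnk fuelColors.keys col < m) :
    cols.foldl
      (fun (bs : List (List String)) col =>
        bs.set ((fuelColors.keys.findIdx? (fun k => PySem.Str.isIn k (PySem.Str.lower col))).getD fuelColors.keys.length)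
          (bs.getD ((fuelColors.keys.findIdx? (fun k => PySem.Str.isIn k (PySem.Str.lower col))).getD fuelColors.keys.length) [] ++ [col]))
      ((List.range m).map f)
      = (List.range m).map (fun i => f i ++ cols.filter (fun x => rnk fuelColors.keys x == i)) := by
  induction cols generalizing f with
  | nil => simp
  | cons col cols ih =>
      have hr : ((fuelColors.keys.findIdx? (fun k => PySem.Str.isIn k (PySem.Str.lower col))).getD fuelColors.keys.length)
          = rnk fuelColors.keys col := by
        rw [findIdx?_getD]; rfl
      have hlt : rnk fuelColors.keys col < m := hm col (by simp)
      simp only [List.foldl_cons, hr]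
      have hget : ((List.range m).map f).getD (rnk fuelColors.keys col) []
          = f (rnk fuelColors.keys col) := by
        rw [List.getD_eq_getElem _ _ (by simp [hlt])]
        simp
      rw [hget, set_map_range, ih _ (fun c hc => hm c (by simp [hc]))]
      apply List.map_congr_left
      intro i hi
      by_cases h : rnk fuelColors.keys col = i
      · simp [← h]
      · simp [h, show i ≠ rnk fuelColors.keys col from fun hh => h hh.symm]

theorem enumerate_map_range (m : Nat) (G : Nat → List String) :
    PySem.List.enumerate ((List.range m).map G)
      = (List.range m).map (fun (i : Nat) => ((i : Int), G i)) := by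
  apply List.ext_getElem
  · simp [PySem.List.length_enumerate]
  · intro i h1 h2
    simp only [List.length_map, List.length_range] at h2
    rw [PySem.List.getElem_enumerate]
    simp

theorem B_fold2 (l : List Nat) (G : Nat → List String) (s c lb : List String) :
    (l.map (fun (i : Nat) => ((i : Int), G i))).foldl
      (fun (st : List String × List String × List String) rb =>
        rb.2.foldl
          (fun (st2 : List String × List String × List String) col =>
            (st2.1 ++ [col],
             st2.2.1 ++ [if rb.1 < (fuelColors.keys.length : Int) then (PySem.Dict.get? fuelColors (PySem.List.pyGetD fuelColors.keys rb.1 "")).getD "" else "grey"],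
             st2.2.2 ++ [if rb.1 < (fuelColors.keys.length : Int) then (PySem.Dict.get? fuelNames (PySem.List.pyGetD fuelColors.keys rb.1 "")).getD "" else col]))
          st)
      (s, c, lb)
      = (s ++ l.flatMap G,
         c ++ l.flatMap (fun i => (G i).map (fun _ => if (i : Int) < (fuelColors.keys.length : Int) then (PySem.Dict.get? fuelColors (PySem.List.pyGetD fuelColors.keys (i : Int) "")).getD "" else "grey")),
         lb ++ l.flatMap (fun i => (G i).map (fun col => if (i : Int) < (fuelColors.keys.length : Int) then (PySem.Dict.get? fuelNames (PySem.List.pyGetD fuelColors.keys (i : Int) "")).getD "" else col))) := by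
  induction l generalizing s c lb with
  | nil => simp
  | cons i l ih =>
      simp only [List.map_cons, List.foldl_cons]
      rw [foldl_app3, ih]
      simp

theorem B_char (columns : List String) :
    sort_color_label_columns_alt columns =
      ((List.range (fuelColors.keys.length + 1)).flatMap
         (fun i => columns.filter (fun x => rnk fuelColors.keys x == i)),
       (List.range (fuelColors.keys.length + 1)).flatMap
         (fun i => (columns.filter (fun x => rnk fuelColors.keys x == i)).map
           (fun _ => if (i : Int) < (fuelColors.keys.length : Int) then (PySem.Dict.get? fuelColors (PySem.List.pyGetD fuelColors.keys (i : Int) "")).getD "" else "grey")),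
       (List.range (fuelColors.keys.length + 1)).flatMap
         (fun i => (columns.filter (fun x => rnk fuelColors.keys x == i)).map
           (fun col => if (i : Int) < (fuelColors.keys.length : Int) then (PySem.Dict.get? fuelNames (PySem.List.pyGetD fuelColors.keys (i : Int) "")).getD "" else col))) := by
  have hrepl : (List.replicate (fuelColors.keys.length + 1) ([] : List String))
      = (List.range (fuelColors.keys.length + 1)).map (fun _ => []) := by
    rw [List.map_const']; simp
  show (PySem.List.enumerate
      (columns.foldl _ (List.replicate (fuelColors.keys.length + 1) []))).foldl _ _ = _
  rw [hrepl, B_fold1 columns (fuelColors.keys.length + 1) (fun _ => [])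
        (fun col _ => Nat.lt_succ_of_le (List.findIdx_le_length)),
      enumerate_map_range, B_fold2]
  simp

theorem A_char (columns : List String) :
    sort_color_label_columns columns =
      ((gT fuelColors.keys columns).1 ++ hR fuelColors.keys columns,
       (gT fuelColors.keys columns).2.1 ++ (hR fuelColors.keys columns).map (fun _ => "grey"),
       (gT fuelColors.keys columns).2.2 ++ (hR fuelColors.keys columns).map (fun col => col)) := by
  show ((fuelColors.keys.foldl _ ([], [], [], columns)).2.2.2.foldl _ _ : List String × List String × List String) = _
  rw [A_outer, foldl_app3]
  simp

-- ===== VERDICT (by name: the statement is the Claim_ definition above) =====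
theorem sort_color_label_columns_spec : Claim_equal_sort_color_label_columns := by
  intro columns _
  unfold Spec_sort_color_label_columns
  rw [A_char, B_char, gT_eq, hR_eq]
  have hsplit : List.range (fuelColors.keys.length + 1)
      = List.range (fuelColors.keys.length) ++ [fuelColors.keys.length] := List.range_succ
  rw [hsplit]
  simp only [List.flatMap_append, List.flatMap_cons, List.flatMap_nil, List.append_nil,
    lt_self_iff_false, if_false]
  refine congrArg₂ Prod.mk ?_ (congrArg₂ Prod.mk ?_ ?_)
  · rfl
  · refine congrArg₂ (· ++ ·) (List.flatMap_congr fun i hi => ?_) rfl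
    have hilt : ((i : Int) < (fuelColors.keys.length : Int)) := by
      exact_mod_cast List.mem_range.mp hi
    refine List.map_congr_left fun col _ => ?_
    rw [if_pos hilt, PySem.List.pyGetD_natCast]
    rfl
  · refine congrArg₂ (· ++ ·) (List.flatMap_congr fun i hi => ?_) rfl
    have hilt : ((i : Int) < (fuelColors.keys.length : Int)) := by
      exact_mod_cast List.mem_range.mp hi
    refine List.map_congr_left fun col _ => ?_
    rw [if_pos hilt, PySem.List.pyGetD_natCast]
    rfl
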